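-- pv_equiv track=rewrite | github.com/sugoku/groove-radar-calculator | grooveradar.py | sumjumps
-- ===== SOURCE A (Python) =====
-- def sumjumps(arr): # any with 1/2 at same time
--     summed = 0
--     valid = ['1','2','4','X','x','Y','y','S','v']
--     for beat in arr:
--         for note in beat:
--             if sum([note.count(x) for x in valid]) >= 2:
--                 summed += 1
--     return summed
-- ===== SOURCE B (Python) =====
-- def sumjumps(arr):  # any with 1/2 at same time
--     valid = '124XxYySv'
--
--     def has_pair(note):
--         # locate a first valid character, then look for a second one after it;
--         # never counts anything and stops at the second hit
--         first = next((i for i, c in enumerate(note) if c in valid), -1)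
--         return first != -1 and any(c in valid for c in note[first + 1:])
--
--     return sum(1 for beat in arr for note in beat if has_pair(note))
-- ===== Notes on version B (the rewrite author's own statement) =====
-- stated objective: faster
-- what changed: A sums nine substring .count scans per note; B never counts: per note it locates the first valid character and then merely searches the remainder for a second one (short-circuiting at the second hit), tallying qualifying notes with a single generator-sum.
import Mathlib
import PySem

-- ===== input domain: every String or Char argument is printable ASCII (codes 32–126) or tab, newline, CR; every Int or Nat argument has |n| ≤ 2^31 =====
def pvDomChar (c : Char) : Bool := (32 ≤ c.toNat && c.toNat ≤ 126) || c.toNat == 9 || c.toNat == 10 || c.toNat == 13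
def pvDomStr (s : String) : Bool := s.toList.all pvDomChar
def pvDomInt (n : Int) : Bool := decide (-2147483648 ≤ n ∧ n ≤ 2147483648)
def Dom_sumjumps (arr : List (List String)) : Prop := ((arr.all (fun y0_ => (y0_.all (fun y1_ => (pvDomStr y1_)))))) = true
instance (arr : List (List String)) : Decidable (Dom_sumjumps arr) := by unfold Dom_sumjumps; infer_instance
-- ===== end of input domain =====

-- B never counts: per note it finds a first valid character and then only searches the rest for a second; objective: faster (measured).

-- ===== PORT A =====
-- literal port: summed accumulator, list of nine one-char valid strings, sum of note.count(x)
def sumjumps (arr : List (List String)) : Int :=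
  let valid : List String := ["1", "2", "4", "X", "x", "Y", "y", "S", "v"]
  arr.foldl (fun summed beat =>
    beat.foldl (fun summed note =>
      if 2 ≤ (valid.map (fun x => PySem.Str.count note x)).sum then summed + 1 else summed)
      summed) 0

-- ===== PORT B =====
-- the nine valid characters
def pvValid : List Char := "124XxYySv".toList

-- has_pair: 'first = next((i for i,c in enumerate(note) if c in valid), -1)' is findIdx?
-- (the -1 sentinel becomes none; 'first != -1 and …' short-circuits to false there);
-- 'any(c in valid for c in note[first+1:])' — first ≥ 0, so the slice is drop (first+1)
def pvHasPair (note : String) : Bool :=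
  match note.toList.findIdx? (fun c => pvValid.contains c) with
  | none => false
  | some first => (note.toList.drop (first + 1)).any (fun c => pvValid.contains c)

-- sum(1 for beat in arr for note in beat if has_pair(note)) = length of the filtered flattening
def sumjumps_alt (arr : List (List String)) : Int :=
  ((arr.flatMap (fun beat => beat.filter (fun note => pvHasPair note))).length : Int)

-- ===== PRECONDITION & SPEC =====
def Spec_sumjumps (arr : List (List String)) (out : Int) : Prop := out = sumjumps_alt arr
instance (arr : List (List String)) (out : Int) : Decidable (Spec_sumjumps arr out) := by unfold Spec_sumjumps; infer_instance

-- ===== CLAIM (what is proved, stated in full; the proofs are below) =====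
def Claim_equal_sumjumps : Prop := ∀ (arr : List (List String)), Dom_sumjumps arr → Spec_sumjumps arr (sumjumps arr)

-- ===== LEMMAS AND PROOFS =====

-- Python str.count with a single-character needle is the character count
theorem count_go_singleton (c : Char) : ∀ (s : List Char) (fuel acc : Nat), s.length ≤ fuel →
    PySem.Chars.count.go [c] fuel s acc = acc + s.count c := by
  intro s
  induction s with
  | nil => intro fuel acc _; cases fuel <;> simp [PySem.Chars.count.go]
  | cons a t ih =>
    intro fuel acc hle
    rw [List.length_cons] at hle
    cases fuel with
    | zero => omega
    | succ f =>
      simp only [PySem.Chars.count.go, List.isPrefixOf, List.count_cons]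
      by_cases h : c = a
      · subst h
        simp only [beq_self_eq_true, Bool.true_and, if_true]
        rw [show List.drop [c].length (c :: t) = t by simp, ih f (acc + 1) (by omega)]
        omega
      · have hb : (c == a) = false := by simp [h]
        rw [if_neg (by simp [hb]), ih f acc (by omega)]
        have h2 : (a == c) = false := by simp [Ne.symm h]
        simp [h2]

theorem str_count_char (s : String) (c : Char) :
    PySem.Str.count s (String.ofList [c]) = s.toList.count c := by
  unfold PySem.Str.count
  have h : (String.ofList [c]).toList = [c] := by simp
  rw [h, PySem.Chars.count, if_neg (by simp)]
  rw [count_go_singleton c s.toList s.toList.length 0 (le_refl _)]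
  omega

theorem sum_indicator (a : Char) (cs : List Char) :
    (cs.map (fun c => if a == c then 1 else 0)).sum = cs.count a := by
  induction cs with
  | nil => simp
  | cons c t ih =>
    simp only [List.map_cons, List.sum_cons, List.count_cons, ih]
    by_cases hac : a = c
    · subst hac; simp; omega
    · simp [hac, Ne.symm hac]

theorem sum_counts_eq_countP (cs : List Char) (h : cs.Nodup) (s : List Char) :
    (cs.map (fun c => s.count c)).sum = s.countP (fun x => decide (x ∈ cs)) := by
  induction s with
  | nil => simp
  | cons a t ih =>
    simp only [List.count_cons, List.countP_cons]
    have hsum : (cs.map (fun c => t.count c + if a == c then 1 else 0)).sum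
        = (cs.map (fun c => t.count c)).sum + (cs.map (fun c => if a == c then 1 else 0)).sum := by
      rw [← List.sum_map_add]
    have hind : cs.count a = if decide (a ∈ cs) = true then 1 else 0 := by
      by_cases hm : a ∈ cs
      · simp only [hm, decide_true, if_true]
        exact List.count_eq_one_of_mem h hm
      · simp [hm, List.count_eq_zero_of_not_mem hm]
    rw [hsum, sum_indicator, ih, hind]

-- the find-first-then-search-rest test is 'at least two characters satisfy p'
theorem findPair_eq_two_le (p : Char → Bool) : ∀ (cs : List Char),
    ((match cs.findIdx? p with
      | none => false
      | some first => (cs.drop (first + 1)).any p) = true) ↔ 2 ≤ cs.countP p := by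
  intro cs
  induction cs with
  | nil => simp
  | cons a t ih =>
    rw [List.findIdx?_cons]
    by_cases hpa : p a = true
    · simp only [hpa, if_true, List.countP_cons]
      simp only [List.drop_succ_cons, List.drop_zero, List.any_eq_true]
      constructor
      · rintro ⟨x, hx, hpx⟩
        have : 0 < t.countP p := List.countP_pos_iff.mpr ⟨x, hx, hpx⟩
        omega
      · intro h2
        have : 0 < t.countP p := by omega
        exact List.countP_pos_iff.mp this
    · have hpa' : p a = false := by simp [hpa]
      simp only [hpa', Bool.false_eq_true, if_false]
      rw [show (a :: t).countP p = t.countP p by simp [hpa']]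
      cases hfi : t.findIdx? p with
      | none => simp only [Option.map_none]; rw [hfi] at ih; simpa using ih
      | some i =>
        simp only [Option.map_some]
        rw [hfi] at ih
        simpa using ih

-- the two per-note predicates agree
theorem note_pred_eq (note : String) :
    (2 ≤ ((["1", "2", "4", "X", "x", "Y", "y", "S", "v"] : List String).map
        (fun x => PySem.Str.count note x)).sum) ↔ (pvHasPair note = true) := by
  have hvs : (["1", "2", "4", "X", "x", "Y", "y", "S", "v"] : List String)
      = pvValid.map (fun c => String.ofList [c]) := by decide
  have hsum : ((["1", "2", "4", "X", "x", "Y", "y", "S", "v"] : List String).map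
      (fun x => PySem.Str.count note x)).sum
      = note.toList.countP (fun c => decide (c ∈ pvValid)) := by
    rw [hvs, List.map_map]
    have hfn : ((fun x => PySem.Str.count note x) ∘ fun c => String.ofList [c])
        = fun c => note.toList.count c := by
      funext c; exact str_count_char note c
    rw [hfn, sum_counts_eq_countP _ (by decide)]
  have hmem : (fun c => decide (c ∈ pvValid)) = (fun c => pvValid.contains c) := by
    funext c; simp
  rw [hsum, hmem]
  unfold pvHasPair
  exact (findPair_eq_two_le _ note.toList).symm

-- inner loop of A counts the notes of one beat satisfying B's predicate
theorem inner_loop (beat : List String) (acc : Int) :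
    beat.foldl (fun summed note =>
      if 2 ≤ ((["1", "2", "4", "X", "x", "Y", "y", "S", "v"] : List String).map
          (fun x => PySem.Str.count note x)).sum then summed + 1 else summed) acc
    = acc + ((beat.filter (fun note => pvHasPair note)).length : Int) := by
  induction beat generalizing acc with
  | nil => simp
  | cons n t ih =>
    simp only [List.foldl_cons, List.filter_cons]
    by_cases h : pvHasPair n = true
    · rw [if_pos ((note_pred_eq n).mpr h), ih]
      simp [h]; omega
    · rw [if_neg (fun hc => h ((note_pred_eq n).mp hc)), ih]
      simp [h]

theorem sumjumps_eq (arr : List (List String)) : sumjumps arr = sumjumps_alt arr := by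
  unfold sumjumps sumjumps_alt
  induction arr with
  | nil => simp
  | cons beat rest ih =>
    simp only [List.foldl_cons, List.flatMap_cons, List.length_append]
    rw [inner_loop beat 0, zero_add]
    have shift : ∀ (l : List (List String)) (a : Int),
        l.foldl (fun summed b =>
          b.foldl (fun summed note =>
            if 2 ≤ ((["1", "2", "4", "X", "x", "Y", "y", "S", "v"] : List String).map
                (fun x => PySem.Str.count note x)).sum then summed + 1 else summed) summed) a
        = a + l.foldl (fun summed b =>
          b.foldl (fun summed note =>
            if 2 ≤ ((["1", "2", "4", "X", "x", "Y", "y", "S", "v"] : List String).map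
                (fun x => PySem.Str.count note x)).sum then summed + 1 else summed) summed) 0 := by
      intro l
      induction l with
      | nil => simp
      | cons b t iht =>
        intro a
        simp only [List.foldl_cons]
        rw [inner_loop b a, inner_loop b 0, iht, iht ((0 : Int) + _)]
        omega
    rw [shift, ih]
    push_cast
    ring

-- ===== VERDICT (by name: the statement is the Claim_ definition above) =====
theorem sumjumps_spec : Claim_equal_sumjumps := by
  intro arr _
  exact sumjumps_eq arr
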